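-- pv_equiv track=rewrite | github.com/dannyp0930/algorithm | programmers/2017 팁스타운/짝지어 제거하기.py | solution
-- ===== SOURCE A (Python) =====
-- def solution(s):
--     stack = []
--     for ch in s:
--         if not stack:
--             stack.append(ch)
--         else:
--             if stack[-1] == ch:
--                 stack.pop()
--                 continue
--             stack.append(ch)
--     if stack:
--         return 0
--     return 1
-- ===== SOURCE B (Python) =====
-- def solution(s):
--     t = list(s)
--     while True:
--         found = -1
--         i = 0
--         while i + 1 < len(t):
--             if t[i] == t[i + 1]:
--                 found = i
--                 break
--             i += 1
--         if found == -1: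
--             break
--         del t[found:found + 2]
--     return 1 if not t else 0
-- ===== Notes on version B (the rewrite author's own statement) =====
-- stated objective: alternative
-- what changed: Replaces the single-pass stack with repeated scan-and-remove of the first adjacent equal pair until no pair remains (relying on confluence of pair removal), then tests emptiness.
import Mathlib
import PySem

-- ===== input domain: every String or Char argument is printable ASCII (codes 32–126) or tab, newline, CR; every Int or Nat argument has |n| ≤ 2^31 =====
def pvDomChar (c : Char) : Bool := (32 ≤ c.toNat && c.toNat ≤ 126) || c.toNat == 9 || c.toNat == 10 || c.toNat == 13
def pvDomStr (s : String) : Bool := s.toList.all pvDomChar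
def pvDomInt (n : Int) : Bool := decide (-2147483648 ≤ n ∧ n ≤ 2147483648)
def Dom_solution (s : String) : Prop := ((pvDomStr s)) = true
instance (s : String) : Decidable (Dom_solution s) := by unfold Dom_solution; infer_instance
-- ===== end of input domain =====

-- B replaces the single-pass stack by repeatedly removing the first adjacent equal pair
-- until none remains (same 0/1 answer by confluence of pair removal); alternative, not faster.

-- ===== PORT A =====
-- one step of A's loop body: the stack update for character ch
def pushA (stack : List Char) (ch : Char) : List Char :=
  if stack.isEmpty then stack ++ [ch]
  else if stack.getLast! == ch then stack.dropLast
  else stack ++ [ch]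

def solution (s : String) : Int :=
  let stack := s.toList.foldl pushA []
  if !stack.isEmpty then 0 else 1

-- ===== PORT B =====
-- inner scan of Source B: the current list with its FIRST adjacent equal pair deleted, or none
def findPair : List Char → Option (List Char)
  | [] => none
  | [_] => none
  | a :: b :: rest => if a == b then some rest else (findPair (b :: rest)).map (a :: ·)

theorem findPair_length {t t' : List Char} (h : findPair t = some t') :
    t'.length + 2 = t.length := by
  induction t generalizing t' with
  | nil => simp [findPair] at h
  | cons a rest ih =>
    match rest, h with
    | [], h => simp [findPair] at h
    | b :: rest, h =>
      by_cases hab : a = b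
      · simp [findPair, hab] at h; subst h; simp
      · simp [findPair, hab] at h
        obtain ⟨w, hw, hw'⟩ := h
        subst hw'
        have := ih hw
        simpa using this

-- outer while-loop of Source B
def reduceLoop (t : List Char) : List Char :=
  match h : findPair t with
  | none => t
  | some t' => reduceLoop t'
termination_by t.length
decreasing_by have := findPair_length h; omega

def solution_alt (s : String) : Int :=
  if (reduceLoop s.toList).isEmpty then 1 else 0

-- ===== PRECONDITION & SPEC =====
def Spec_solution (s : String) (out : Int) : Prop := out = solution_alt s
instance (s : String) (out : Int) : Decidable (Spec_solution s out) := by unfold Spec_solution; infer_instance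

-- ===== CLAIM (what is proved, stated in full; the proofs are below) =====
def Claim_equal_solution : Prop := ∀ (s : String), Dom_solution s → Spec_solution s (solution s)

-- ===== LEMMAS AND PROOFS =====

theorem pushA_nil (c : Char) : pushA [] c = [c] := by simp [pushA]

theorem pushA_concat (ys : List Char) (d c : Char) :
    pushA (ys ++ [d]) c = if d = c then ys else ys ++ [d] ++ [c] := by
  have h1 : (ys ++ [d]).getLast! = d := by simp
  have h2 : (ys ++ [d]).isEmpty = false := by simp
  simp only [pushA, h1, h2, Bool.false_eq_true, if_false, beq_iff_eq, List.dropLast_concat]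

-- the stack never holds two adjacent equal characters
theorem pushA_chain {st : List Char} (c : Char) (h : List.IsChain (· ≠ ·) st) :
    List.IsChain (· ≠ ·) (pushA st c) := by
  rcases List.eq_nil_or_concat st with rfl | ⟨ys, d, rfl⟩
  · simpa [pushA_nil] using List.isChain_singleton c
  · rw [List.concat_eq_append] at h ⊢
    rw [pushA_concat]
    split_ifs with hd
    · exact (List.isChain_append.mp h).1
    · rw [List.append_assoc]
      rw [List.isChain_append] at h ⊢
      refine ⟨h.1, by rw [List.singleton_append]; exact List.isChain_pair.mpr hd, ?_⟩
      intro x hx y hy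
      simp at hy
      subst hy
      exact h.2.2 x hx d (by simp)

-- pushing the same character twice is a no-op on a well-formed stack
theorem pushA_pushA {st : List Char} (c : Char) (h : List.IsChain (· ≠ ·) st) :
    pushA (pushA st c) c = st := by
  rcases List.eq_nil_or_concat st with rfl | ⟨ys, d, rfl⟩
  · rw [pushA_nil]
    simpa using pushA_concat [] c c
  · rw [List.concat_eq_append] at h ⊢
    rw [pushA_concat]
    split_ifs with hd
    · subst hd
      rcases List.eq_nil_or_concat ys with rfl | ⟨zs, e, rfl⟩
      · simp [pushA_nil]
      · rw [List.concat_eq_append] at h ⊢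
        rw [pushA_concat]
        have : e ≠ d := by
          rw [List.append_assoc, List.isChain_append] at h
          simpa using List.isChain_pair.mp h.2.1
        simp [this]
    · rw [pushA_concat]
      simp

-- removing an adjacent equal pair anywhere does not change A's final stack
theorem run_cancel (u : List Char) (c : Char) (v : List Char) :
    ∀ st : List Char, List.IsChain (· ≠ ·) st →
      List.foldl pushA st (u ++ c :: c :: v) = List.foldl pushA st (u ++ v) := by
  induction u with
  | nil =>
    intro st h
    simp [List.foldl_cons, pushA_pushA c h]
  | cons a u ih =>
    intro st h
    simpa [List.foldl_cons] using ih (pushA st a) (pushA_chain a h)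

-- a pair-free suffix just stacks on top of a compatible stack
theorem run_fix (t : List Char) :
    ∀ st : List Char, List.IsChain (· ≠ ·) (st ++ t) →
      List.foldl pushA st t = st ++ t := by
  induction t with
  | nil => intro st _; simp
  | cons c t ih =>
    intro st h
    have hstep : pushA st c = st ++ [c] := by
      rcases List.eq_nil_or_concat st with rfl | ⟨ys, d, rfl⟩
      · simp [pushA_nil]
      · rw [List.concat_eq_append] at h ⊢
        rw [pushA_concat]
        have : d ≠ c := by
          rw [List.append_assoc, List.isChain_append] at h
          exact (List.isChain_cons_cons.mp (by simpa using h.2.1)).1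
        simp [this]
    rw [List.foldl_cons, hstep, ih (st ++ [c]) (by simpa using h)]
    simp

theorem findPair_none {t : List Char} (h : findPair t = none) :
    List.IsChain (· ≠ ·) t := by
  induction t with
  | nil => exact List.isChain_nil
  | cons a rest ih =>
    match rest, h with
    | [], _ => exact List.isChain_singleton a
    | b :: rest, h =>
      by_cases hab : a = b
      · simp [findPair, hab] at h
      · simp [findPair, hab] at h
        exact List.isChain_cons_cons.mpr ⟨hab, ih h⟩

theorem findPair_some {t t' : List Char} (h : findPair t = some t') :
    ∃ u c v, t = u ++ c :: c :: v ∧ t' = u ++ v := by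
  induction t generalizing t' with
  | nil => simp [findPair] at h
  | cons a rest ih =>
    match rest, h with
    | [], h => simp [findPair] at h
    | b :: rest, h =>
      by_cases hab : a = b
      · simp [findPair, hab] at h
        exact ⟨[], b, rest, by simp [hab, h], by simp [h]⟩
      · simp [findPair, hab] at h
        obtain ⟨w, hw, hw'⟩ := h
        obtain ⟨u, c, v, h1, h2⟩ := ih hw
        exact ⟨a :: u, c, v, by simp [h1], by simp [← hw', h2]⟩

theorem reduceLoop_run (t : List Char) :
    List.foldl pushA [] (reduceLoop t) = List.foldl pushA [] t := by
  fun_induction reduceLoop t with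
  | case1 t h => rfl
  | case2 t t' h ih =>
    rw [ih]
    obtain ⟨u, c, v, h1, h2⟩ := findPair_some h
    rw [h1, h2, run_cancel u c v [] List.isChain_nil]

theorem reduceLoop_chain (t : List Char) :
    List.IsChain (· ≠ ·) (reduceLoop t) := by
  fun_induction reduceLoop t with
  | case1 t h => exact findPair_none h
  | case2 t t' h ih => exact ih

-- ===== VERDICT (by name: the statement is the Claim_ definition above) =====
theorem solution_spec : Claim_equal_solution := by
  intro s _
  unfold Spec_solution solution solution_alt
  have hrun : List.foldl pushA [] s.toList = reduceLoop s.toList := by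
    rw [← reduceLoop_run s.toList,
        run_fix (reduceLoop s.toList) [] (by simpa using reduceLoop_chain s.toList)]
    simp
  simp only [hrun]
  generalize reduceLoop s.toList = t
  cases t <;> rfl
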